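-- pv_equiv track=rewrite | github.com/hulryung-uo/anima | anima/skills/forum_action.py | _parse_forum_post
-- ===== SOURCE A (Python) =====
-- def _parse_forum_post(text: str, fallback_author: str) -> tuple[str, str]:
--     """Parse TITLE:/BODY: format from LLM output."""
--     title = f"{fallback_author}'s Adventures"
--     body = text
--
--     lines = text.splitlines()
--     for i, line in enumerate(lines):
--         if line.upper().startswith("TITLE:"):
--             title = line[6:].strip()
--         elif line.upper().startswith("BODY:"):
--             # Body is everything after the BODY: line
--             rest = line[5:].strip()
--             if rest:
--                 body = rest + "\n" + "\n".join(lines[i + 1:])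
--             else:
--                 body = "\n".join(lines[i + 1:])
--             body = body.strip()
--             break
--
--     return title, body
-- ===== SOURCE B (Python) =====
-- def _parse_forum_post(text: str, fallback_author: str) -> tuple[str, str]:
--     """Parse TITLE:/BODY: format from LLM output (two-pass decomposition)."""
--     lines = text.splitlines()
--
--     body_idx = None
--     for i, line in enumerate(lines):
--         if line.upper().startswith("BODY:"):
--             body_idx = i
--             break
--
--     scan = lines if body_idx is None else lines[:body_idx]
--     title = fallback_author + "'s Adventures"
--     for line in scan:
--         if line.upper().startswith("TITLE:"):
--             title = line[6:].strip()
--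
--     if body_idx is None:
--         body = text
--     else:
--         rest = lines[body_idx][5:].strip()
--         tail = "\n".join(lines[body_idx + 1:])
--         body = (rest + "\n" + tail if rest else tail).strip()
--
--     return title, body
-- ===== Notes on version B (the rewrite author's own statement) =====
-- stated objective: alternative
-- what changed: Replaces A's single break-out loop with interleaved title/body state by a two-pass decomposition: first locate the first BODY: line index, then fold the title over only the lines before it, then reconstruct the body separately from that index.
import Mathlib
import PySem

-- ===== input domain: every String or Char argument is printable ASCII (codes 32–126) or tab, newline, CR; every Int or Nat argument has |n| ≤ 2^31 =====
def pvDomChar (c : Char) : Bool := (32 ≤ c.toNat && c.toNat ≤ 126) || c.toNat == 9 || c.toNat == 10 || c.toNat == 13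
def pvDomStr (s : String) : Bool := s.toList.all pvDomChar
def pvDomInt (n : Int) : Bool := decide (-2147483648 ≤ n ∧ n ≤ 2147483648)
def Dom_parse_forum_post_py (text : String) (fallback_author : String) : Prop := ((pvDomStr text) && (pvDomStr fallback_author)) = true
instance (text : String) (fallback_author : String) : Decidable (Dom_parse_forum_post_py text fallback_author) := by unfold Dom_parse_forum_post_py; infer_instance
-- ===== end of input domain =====

-- B replaces A's single break-out loop by a two-pass decomposition (find the BODY index first,
-- then fold the title over the prefix, then build the body) — objective: alternative structure.


-- ===== PORT A =====
-- A's loop: walk the lines, updating title on TITLE: lines, breaking with the built body on the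
-- first BODY: line; lines[i+1:] is the tail of the current suffix.
def pfpA_loop (text : String) (title : String) : List String → String × String
  | [] => (title, text)
  | l :: t =>
    if PySem.Str.startswith (PySem.Str.upper l) "TITLE:" then
      pfpA_loop text (PySem.Str.strip (PySem.Str.slice l (some 6) none)) t
    else if PySem.Str.startswith (PySem.Str.upper l) "BODY:" then
      let rest := PySem.Str.strip (PySem.Str.slice l (some 5) none)
      let body := if rest ≠ "" then rest ++ "\n" ++ PySem.Str.join "\n" t
                  else PySem.Str.join "\n" t
      (title, PySem.Str.strip body)
    else
      pfpA_loop text title t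

def parse_forum_post_py (text : String) (fallback_author : String) : String × String :=
  pfpA_loop text (fallback_author ++ "'s Adventures") (PySem.Str.splitlines text)

-- ===== PORT B =====
-- index of the first line whose upper() starts with "BODY:"
def pfpB_findBody : List String → Option Nat
  | [] => none
  | l :: t =>
    if PySem.Str.startswith (PySem.Str.upper l) "BODY:" then some 0
    else (pfpB_findBody t).map (· + 1)

-- last TITLE: line of the scanned prefix
def pfpB_title (fallback_author : String) (scan : List String) : String :=
  scan.foldl
    (fun acc l =>
      if PySem.Str.startswith (PySem.Str.upper l) "TITLE:" then
        PySem.Str.strip (PySem.Str.slice l (some 6) none)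
      else acc)
    (fallback_author ++ "'s Adventures")

def parse_forum_post_py_alt (text : String) (fallback_author : String) : String × String :=
  let lines := PySem.Str.splitlines text
  match pfpB_findBody lines with
  | none => (pfpB_title fallback_author lines, text)
  | some i =>
    let rest := PySem.Str.strip (PySem.Str.slice (lines.getD i "") (some 5) none)
    let tailJ := PySem.Str.join "\n" (lines.drop (i + 1))
    let body := if rest ≠ "" then rest ++ "\n" ++ tailJ else tailJ
    (pfpB_title fallback_author (lines.take i), PySem.Str.strip body)

-- ===== PRECONDITION & SPEC =====
def Spec_parse_forum_post_py (text : String) (fallback_author : String) (out : String × String) : Prop := out = parse_forum_post_py_alt text fallback_author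
instance (text : String) (fallback_author : String) (out : String × String) : Decidable (Spec_parse_forum_post_py text fallback_author out) := by unfold Spec_parse_forum_post_py; infer_instance

-- ===== CLAIM (what is proved, stated in full; the proofs are below) =====
def Claim_equal_parse_forum_post_py : Prop := ∀ (text : String) (fallback_author : String), Dom_parse_forum_post_py text fallback_author → Spec_parse_forum_post_py text fallback_author (parse_forum_post_py text fallback_author)

-- ===== LEMMAS AND PROOFS =====

-- B's result, abstracted over an arbitrary title accumulator (pfpB_title's fold with init `init`).
def pfpB_result (text : String) (init : String) (lines : List String) : String × String :=
  let tfold := fun scan => scan.foldl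
    (fun acc l =>
      if PySem.Str.startswith (PySem.Str.upper l) "TITLE:" then
        PySem.Str.strip (PySem.Str.slice l (some 6) none)
      else acc) init
  match pfpB_findBody lines with
  | none => (tfold lines, text)
  | some i =>
    let rest := PySem.Str.strip (PySem.Str.slice (lines.getD i "") (some 5) none)
    let tailJ := PySem.Str.join "\n" (lines.drop (i + 1))
    let body := if rest ≠ "" then rest ++ "\n" ++ tailJ else tailJ
    (tfold (lines.take i), PySem.Str.strip body)

theorem pfpA_loop_eq_result (text : String) :
    ∀ (ls : List String) (title : String),
      pfpA_loop text title ls = pfpB_result text title ls := by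
  intro ls
  induction ls with
  | nil => intro title; rfl
  | cons l t ih =>
    intro title
    by_cases hT : PySem.Chars.startswith (PySem.Chars.upper l.toList) ['T', 'I', 'T', 'L', 'E', ':'] = true
    · have hB : PySem.Chars.startswith (PySem.Chars.upper l.toList) ['B', 'O', 'D', 'Y', ':'] = false := by
        by_contra h
        have hB' : PySem.Chars.startswith (PySem.Chars.upper l.toList) ['B', 'O', 'D', 'Y', ':'] = true := by
          revert h; cases PySem.Chars.startswith (PySem.Chars.upper l.toList) ['B', 'O', 'D', 'Y', ':'] <;> simp
        -- a line cannot start with both "TITLE:" and "BODY:"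
        rcases (PySem.Chars.startswith_iff _ _).mp hT with ⟨r1, e1⟩
        rcases (PySem.Chars.startswith_iff _ _).mp hB' with ⟨r2, e2⟩
        rw [← e2] at e1
        simp [List.cons.injEq] at e1
      rw [pfpA_loop, if_pos (by simpa using hT), ih]
      simp only [pfpB_result, pfpB_findBody]
      simp only [PySem.Str.startswith, PySem.Str.upper]
      cases pfpB_findBody t <;> simp [hT, hB, List.foldl_cons]
    · rw [pfpA_loop, if_neg (by simpa using hT)]
      by_cases hB : PySem.Chars.startswith (PySem.Chars.upper l.toList) ['B', 'O', 'D', 'Y', ':'] = true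
      · rw [if_pos (by simpa using hB)]
        simp only [pfpB_result, pfpB_findBody]
        simp only [PySem.Str.startswith, PySem.Str.upper]
        simp [hB]
      · rw [if_neg (by simpa using hB), ih]
        simp only [pfpB_result, pfpB_findBody]
        simp only [PySem.Str.startswith, PySem.Str.upper]
        cases pfpB_findBody t <;> simp [hT, hB, List.foldl_cons]

-- ===== VERDICT (by name: the statement is the Claim_ definition above) =====
theorem parse_forum_post_py_spec : Claim_equal_parse_forum_post_py := by
  intro text fallback_author _
  unfold Spec_parse_forum_post_py parse_forum_post_py parse_forum_post_py_alt
  rw [pfpA_loop_eq_result]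
  simp only [pfpB_result, pfpB_title]
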